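-- pv_equiv track=rewrite | github.com/AmitIshay/pythonProject16 | Tables.py | replaceMarkInStreet
-- ===== SOURCE A (Python) =====
-- def replaceMarkInStreet(name):
--     if name.startswith('.'):
--         name = name[1:]
--     if name.endswith('.'):
--         name = name[:-1]
--     characters = ['!','%','*',',','-','/',':',';','#','.']
--     # re.sub(r'&#259;', 'a', name)
--     # re.sub(r'&#1091;','y', name)
--     # re.sub(r'&#1047;', 'c', name)
--     # re.sub(r'&#30136;', 'ee', name)
--     for char in characters:
--         name = name.replace(char, '')
--     if '?' in name:
--         name = name.replace('?','a')
--     if name.startswith('? ') or name.endswith(' ?'):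
--         name = name.replace('?', '')
--     # if '!' in name:
--     #     name = name.replace('!','')
--     # if '%' in name:
--     #     name = name.replace('%','')
--     # if '*' in name:
--     #     name = name.replace('*','')
--
--     return name
-- ===== SOURCE B (Python) =====
-- def replaceMarkInStreet(name):
--     removal = {'!', '%', '*', ',', '-', '/', ':', ';', '#', '.'}
--     return ''.join('a' if c == '?' else c for c in name if c not in removal)
-- ===== Notes on version B (the rewrite author's own statement) =====
-- stated objective: simpler
-- what changed: B replaces A's ten whole-string replace passes plus dot-strip and dead '?' branches by one single pass over the input characters, dropping characters in a removal set and mapping '?' to 'a'.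
import Mathlib
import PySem

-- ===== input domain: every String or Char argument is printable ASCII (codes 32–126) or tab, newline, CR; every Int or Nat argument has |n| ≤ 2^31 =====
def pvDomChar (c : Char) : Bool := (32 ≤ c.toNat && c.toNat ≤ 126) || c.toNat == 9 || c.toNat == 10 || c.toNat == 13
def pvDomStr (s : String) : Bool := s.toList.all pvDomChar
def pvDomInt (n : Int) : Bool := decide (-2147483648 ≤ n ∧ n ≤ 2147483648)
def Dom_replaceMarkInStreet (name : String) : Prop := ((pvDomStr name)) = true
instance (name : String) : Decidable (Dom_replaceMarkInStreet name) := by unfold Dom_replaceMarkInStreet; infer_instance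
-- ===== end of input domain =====

-- B makes one pass over the input characters (drop the removal set, map '?'→'a') instead of
-- A's dot strips, ten whole-string replace passes and '?' branches; objective: simpler.

-- ===== PORT A =====
def replaceMarkInStreet (name : String) : String :=
  let name := if PySem.Str.startswith name "." then PySem.Str.slice name (some 1) none else name
  let name := if PySem.Str.endswith name "." then PySem.Str.slice name none (some (-1)) else name
  let characters : List String := ["!", "%", "*", ",", "-", "/", ":", ";", "#", "."]
  let name := characters.foldl (fun acc ch => PySem.Str.replace acc ch "") name
  let name := if PySem.Str.isIn "?" name then PySem.Str.replace name "?" "a" else name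
  let name := if PySem.Str.startswith name "? " || PySem.Str.endswith name " ?" then
                PySem.Str.replace name "?" "" else name
  name

-- ===== PORT B =====
def replaceMarkInStreet_alt (name : String) : String :=
  let removal : PySem.Set Char := PySem.Set.ofList ['!', '%', '*', ',', '-', '/', ':', ';', '#', '.']
  String.ofList (name.toList.filterMap
    (fun c => if PySem.Set.contains removal c then none
              else some (if c == '?' then 'a' else c)))

-- ===== PRECONDITION & SPEC =====
def Spec_replaceMarkInStreet (name : String) (out : String) : Prop := out = replaceMarkInStreet_alt name
instance (name : String) (out : String) : Decidable (Spec_replaceMarkInStreet name out) := by unfold Spec_replaceMarkInStreet; infer_instance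

-- ===== CLAIM (what is proved, stated in full; the proofs are below) =====
def Claim_equal_replaceMarkInStreet : Prop := ∀ (name : String), Dom_replaceMarkInStreet name → Spec_replaceMarkInStreet name (replaceMarkInStreet name)

-- ===== LEMMAS AND PROOFS =====

-- replacing a single character by "" is a filter
theorem replace_go_del (ch : Char) (fuel : Nat) (l acc : List Char) (h : l.length ≤ fuel) :
    PySem.Chars.replace.go [ch] [] fuel l acc
      = acc.reverse ++ l.filter (fun a => !(a == ch)) := by
  induction fuel generalizing l acc with
  | zero =>
    cases l with
    | nil => simp [PySem.Chars.replace.go]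
    | cons c t => simp at h
  | succ n ih =>
    cases l with
    | nil => simp [PySem.Chars.replace.go]
    | cons c t =>
      have hlen : t.length ≤ n := by simp at h; omega
      by_cases hc : c = ch
      · have : PySem.Chars.replace.go [ch] [] (n+1) (c :: t) acc
            = PySem.Chars.replace.go [ch] [] n t acc := by
          simp [PySem.Chars.replace.go, List.isPrefixOf, hc]
        rw [this, ih t acc hlen]
        simp [hc]
      · have : PySem.Chars.replace.go [ch] [] (n+1) (c :: t) acc
            = PySem.Chars.replace.go [ch] [] n t (c :: acc) := by
          simp [PySem.Chars.replace.go, List.isPrefixOf, Ne.symm hc]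
        rw [this, ih t (c :: acc) hlen]
        simp [hc]

theorem replace_del (ch : Char) (l : List Char) :
    PySem.Chars.replace l [ch] [] = l.filter (fun a => !(a == ch)) := by
  rw [PySem.Chars.replace, if_neg (by simp)]
  simpa using replace_go_del ch l.length l [] le_rfl

-- replacing '?' by 'a' is a map
theorem replace_go_map (fuel : Nat) (l acc : List Char) (h : l.length ≤ fuel) :
    PySem.Chars.replace.go ['?'] ['a'] fuel l acc
      = acc.reverse ++ l.map (fun c => if c == '?' then 'a' else c) := by
  induction fuel generalizing l acc with
  | zero =>
    cases l with
    | nil => simp [PySem.Chars.replace.go]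
    | cons c t => simp at h
  | succ n ih =>
    cases l with
    | nil => simp [PySem.Chars.replace.go]
    | cons c t =>
      have hlen : t.length ≤ n := by simp at h; omega
      by_cases hc : c = '?'
      · have : PySem.Chars.replace.go ['?'] ['a'] (n+1) (c :: t) acc
            = PySem.Chars.replace.go ['?'] ['a'] n t ('a' :: acc) := by
          simp [PySem.Chars.replace.go, List.isPrefixOf, hc]
        rw [this, ih t _ hlen]
        simp [hc]
      · have : PySem.Chars.replace.go ['?'] ['a'] (n+1) (c :: t) acc
            = PySem.Chars.replace.go ['?'] ['a'] n t (c :: acc) := by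
          simp [PySem.Chars.replace.go, List.isPrefixOf, Ne.symm hc]
        rw [this, ih t _ hlen]
        simp [hc]

theorem replace_qa (l : List Char) :
    PySem.Chars.replace l ['?'] ['a'] = l.map (fun c => if c == '?' then 'a' else c) := by
  rw [PySem.Chars.replace, if_neg (by simp)]
  simpa using replace_go_map l.length l [] le_rfl

def pvRemoved (c : Char) : Bool := c ∈ (['!', '%', '*', ',', '-', '/', ':', ';', '#', '.'] : List Char)

-- A's ten replace passes are one filter
theorem chainA (s : String) :
    ((["!", "%", "*", ",", "-", "/", ":", ";", "#", "."] : List String).foldl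
        (fun acc ch => PySem.Str.replace acc ch "") s).toList
      = s.toList.filter (fun c => !(pvRemoved c)) := by
  simp only [List.foldl_cons, List.foldl_nil, PySem.Str.toList_replace]
  simp only [show ("!" : String).toList = ['!'] from rfl, show ("%" : String).toList = ['%'] from rfl,
    show ("*" : String).toList = ['*'] from rfl, show ("," : String).toList = [','] from rfl,
    show ("-" : String).toList = ['-'] from rfl, show ("/" : String).toList = ['/'] from rfl,
    show (":" : String).toList = [':'] from rfl, show (";" : String).toList = [';'] from rfl,
    show ("#" : String).toList = ['#'] from rfl, show ("." : String).toList = ['.'] from rfl,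
    show ("" : String).toList = [] from rfl]
  simp only [replace_del, List.filter_filter]
  apply List.filter_congr
  intro a _
  rw [Bool.eq_iff_iff]
  simp [pvRemoved]
  tauto

-- B's single pass, split into its filter and map parts
theorem filterMap_eq_map_filter (l : List Char) :
    l.filterMap (fun c => if pvRemoved c then none else some (if c == '?' then 'a' else c))
      = (l.filter (fun c => !(pvRemoved c))).map (fun c => if c == '?' then 'a' else c) := by
  induction l with
  | nil => rfl
  | cons c t ih =>
    by_cases h : pvRemoved c
    · simpa [List.filterMap_cons, List.filter_cons, h] using ih
    · simpa [List.filterMap_cons, List.filter_cons, h] using ih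

-- what A computes, characterised on the character list
theorem portA_chars (name : String) :
    (replaceMarkInStreet name).toList
      = (name.toList.filter (fun c => !(pvRemoved c))).map (fun c => if c == '?' then 'a' else c) := by
  unfold replaceMarkInStreet
  set q : Char → Bool := fun c => !(pvRemoved c) with hq
  set f : Char → Char := fun c => if c == '?' then 'a' else c with hf
  set s1 := if PySem.Str.startswith name "." then PySem.Str.slice name (some 1) none else name with hs1
  set s2 := if PySem.Str.endswith s1 "." then PySem.Str.slice s1 none (some (-1)) else s1 with hs2
  set s3 := (["!", "%", "*", ",", "-", "/", ":", ";", "#", "."] : List String).foldl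
      (fun acc ch => PySem.Str.replace acc ch "") s2 with hs3
  set s4 := if PySem.Str.isIn "?" s3 then PySem.Str.replace s3 "?" "a" else s3 with hs4
  have hqdot : q '.' = false := by simp [hq, pvRemoved]
  -- leading-dot strip does not change the filtered list
  have h1 : s1.toList.filter q = name.toList.filter q := by
    rw [hs1]
    by_cases h : PySem.Str.startswith name "."
    · rw [if_pos h]
      rw [PySem.Str.startswith_eq, PySem.Chars.startswith_iff] at h
      rw [show ("." : String).toList = ['.'] from rfl] at h
      obtain ⟨t, ht⟩ := h
      simp only [PySem.Str.toList_slice, PySem.Chars.slice_eq_listSlice, PySem.List.slice_from_one]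
      rw [← ht]
      simp [hqdot]
    · rw [if_neg h]
  -- trailing-dot strip does not change it either
  have h2 : s2.toList.filter q = s1.toList.filter q := by
    rw [hs2]
    by_cases h : PySem.Str.endswith s1 "."
    · rw [if_pos h]
      rw [PySem.Str.endswith_eq, PySem.Chars.endswith_iff] at h
      rw [show ("." : String).toList = ['.'] from rfl] at h
      obtain ⟨init, hi⟩ := h
      rw [PySem.Str.slice_to_neg_one, ← hi, List.dropLast_concat]
      simp [List.filter_append, hqdot]
    · rw [if_neg h]
  -- the replace chain is the filter
  have h3 : s3.toList = s2.toList.filter q := chainA s2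
  -- the '?'→'a' step is the map (also when the branch is not taken)
  have h4 : s4.toList = s3.toList.map f := by
    rw [hs4]
    by_cases h : PySem.Str.isIn "?" s3
    · rw [if_pos h, PySem.Str.toList_replace]
      exact replace_qa s3.toList
    · rw [if_neg h]
      rw [Bool.not_eq_true] at h
      rw [PySem.Str.isIn_eq, PySem.Chars.isIn_eq_false_iff] at h
      have hmem : '?' ∉ s3.toList := fun hm => h ((List.singleton_infix_iff _ _).mpr hm)
      have : s3.toList.map f = s3.toList.map id := by
        apply List.map_congr_left
        intro a ha
        have : ¬ a = '?' := fun e => hmem (e ▸ ha)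
        simp [hf, this]
      simp [this]
  -- no '?' survives the map, so the last branch is the identity either way
  have hnoq : ∀ c ∈ s4.toList, (!(c == '?')) = true := by
    intro c hc
    rw [h4] at hc
    obtain ⟨x, _, hx⟩ := List.mem_map.mp hc
    by_cases hxq : x = '?'
    · simp [hf, hxq] at hx
      simp [← hx]
    · simp [hf, hxq] at hx
      simp [← hx]
      exact hxq
  have h5 : (if PySem.Str.startswith s4 "? " || PySem.Str.endswith s4 " ?" then
                PySem.Str.replace s4 "?" "" else s4).toList = s4.toList := by
    by_cases h : (PySem.Str.startswith s4 "? " || PySem.Str.endswith s4 " ?") = true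
    · rw [if_pos h, PySem.Str.toList_replace,
        show ("?" : String).toList = ['?'] from rfl, show ("" : String).toList = [] from rfl,
        replace_del]
      exact List.filter_eq_self.mpr hnoq
    · rw [if_neg h]
  rw [h5, h4, h3, h2, h1]

-- B's removal-set membership is pvRemoved
theorem contains_removal (c : Char) :
    PySem.Set.contains (PySem.Set.ofList ['!', '%', '*', ',', '-', '/', ':', ';', '#', '.']) c
      = pvRemoved c := by
  rw [Bool.eq_iff_iff]
  simp [PySem.Set.contains, pvRemoved]

-- ===== VERDICT (by name: the statement is the Claim_ definition above) =====
theorem replaceMarkInStreet_spec : Claim_equal_replaceMarkInStreet := by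
  intro name _
  unfold Spec_replaceMarkInStreet replaceMarkInStreet_alt
  have hB : (name.toList.filterMap
      (fun c => if PySem.Set.contains (PySem.Set.ofList ['!', '%', '*', ',', '-', '/', ':', ';', '#', '.']) c
                then none else some (if c == '?' then 'a' else c)))
      = (name.toList.filter (fun c => !(pvRemoved c))).map (fun c => if c == '?' then 'a' else c) := by
    rw [← filterMap_eq_map_filter]
    apply List.filterMap_congr
    intro a _
    rw [contains_removal]
  calc replaceMarkInStreet name
      = String.ofList ((replaceMarkInStreet name).toList) := (String.ofList_toList).symm
    _ = _ := by rw [portA_chars, ← hB]
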